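-- pv_equiv track=rewrite | github.com/sonambharti/Python | DP/altSubarrPrefix.py | altSubarrPrefix
-- ===== SOURCE A (Python) =====
-- def altSubarrPrefix(arr):
--     n = len(arr)
--     dp = [0] * n
--     dp[n-1] = 1
--     for i in range(n-2, -1, -1):
--         if (arr[i] > 0 and arr[i+1] < 0) or (arr[i] < 0 and arr[i+1] > 0):
--             dp[i] = dp[i+1] + 1
--         else:
--             dp[i] = 1
--     return dp
-- ===== SOURCE B (Python) =====
-- def altSubarrPrefix(arr):
--     # forward segment scan: find each maximal alternating-sign segment and
--     # fill its lengths with a descending range, instead of A's backward DP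
--     res = []
--     runlen = 0
--     for x, nxt in zip(arr, arr[1:]):
--         runlen += 1
--         if not ((x > 0 and nxt < 0) or (x < 0 and nxt > 0)):
--             res.extend(range(runlen, 0, -1))
--             runlen = 0
--     if arr:
--         res.extend(range(runlen + 1, 0, -1))
--     return res
-- ===== Notes on version B (the rewrite author's own statement) =====
-- stated objective: alternative
-- what changed: Replaces A's backward dp recurrence (dp[i] = dp[i+1]+1 scanning indices n-2..0) with a single forward scan over adjacent pairs that detects each maximal alternating-sign segment and emits its lengths as one descending range per segment.
import Mathlib
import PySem

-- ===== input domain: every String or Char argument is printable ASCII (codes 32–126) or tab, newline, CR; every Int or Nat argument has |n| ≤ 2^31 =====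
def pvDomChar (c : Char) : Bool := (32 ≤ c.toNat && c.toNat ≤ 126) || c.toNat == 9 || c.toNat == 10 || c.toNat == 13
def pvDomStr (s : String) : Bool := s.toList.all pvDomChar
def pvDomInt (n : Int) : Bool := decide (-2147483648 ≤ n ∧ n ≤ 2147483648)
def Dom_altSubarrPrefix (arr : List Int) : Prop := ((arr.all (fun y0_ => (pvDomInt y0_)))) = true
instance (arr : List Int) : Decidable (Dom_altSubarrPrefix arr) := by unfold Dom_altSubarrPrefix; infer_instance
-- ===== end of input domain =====

-- B replaces A's backward DP recurrence by a forward segment scan that fills each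
-- maximal alternating-sign segment with a descending range (alternative decomposition, same cost).


-- ===== PORT A =====
-- literal transliteration of A: dp backward recurrence over range(n-2, -1, -1)
def altSubarrPrefix (arr : List Int) : List Int :=
  let n : Int := arr.length
  let dp := List.replicate arr.length (0 : Int)
  let dp := PySem.List.pySetD dp (n - 1) 1
  (PySem.List.pyRange (n - 2) (-1) (-1)).foldl
    (fun dp i =>
      if (PySem.List.pyGetD arr i 0 > 0 && PySem.List.pyGetD arr (i + 1) 0 < 0) ||
         (PySem.List.pyGetD arr i 0 < 0 && PySem.List.pyGetD arr (i + 1) 0 > 0) then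
        PySem.List.pySetD dp i (PySem.List.pyGetD dp (i + 1) 0 + 1)
      else
        PySem.List.pySetD dp i 1) dp

-- ===== PORT B =====
-- literal transliteration of B: forward scan over zip(arr, arr[1:]) with segment flushes
def altSubarrPrefix_alt (arr : List Int) : List Int :=
  let s := (arr.zip (PySem.List.slice arr (some 1) none)).foldl
    (fun (s : List Int × Int) p =>
      let runlen := s.2 + 1
      if !((p.1 > 0 && p.2 < 0) || (p.1 < 0 && p.2 > 0)) then
        (s.1 ++ PySem.List.pyRange runlen 0 (-1), 0)
      else
        (s.1, runlen)) ([], 0)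
  if arr.isEmpty then s.1 else s.1 ++ PySem.List.pyRange (s.2 + 1) 0 (-1)

-- ===== PRECONDITION & SPEC =====
-- Pre_ excludes only the empty list, on which A raises IndexError (dp[n-1] with n = 0).
def Pre_altSubarrPrefix (arr : List Int) : Prop := arr ≠ []
instance (arr : List Int) : Decidable (Pre_altSubarrPrefix arr) := by unfold Pre_altSubarrPrefix; infer_instance
def pvWitness_altSubarrPrefix : List Int := [1, -2, 3]

def Spec_altSubarrPrefix (arr : List Int) (out : List Int) : Prop := out = altSubarrPrefix_alt arr
instance (arr : List Int) (out : List Int) : Decidable (Spec_altSubarrPrefix arr out) := by unfold Spec_altSubarrPrefix; infer_instance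

-- ===== CLAIM (what is proved, stated in full; the proofs are below) =====
def Claim_equal_altSubarrPrefix : Prop := ∀ (arr : List Int), Dom_altSubarrPrefix arr → Pre_altSubarrPrefix arr → Spec_altSubarrPrefix arr (altSubarrPrefix arr)

-- ===== LEMMAS AND PROOFS =====

-- reference: length of the alternating-sign run starting at each position
def runLen : Int → List Int → Int
  | _, [] => 1
  | a, b :: t => if (a > 0 && b < 0) || (a < 0 && b > 0) then runLen b t + 1 else 1

def dpRef : List Int → List Int
  | [] => []
  | a :: t => runLen a t :: dpRef t

lemma one_le_runLen (a : Int) (t : List Int) : 1 ≤ runLen a t := by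
  cases t with
  | nil => simp [runLen]
  | cons b t =>
    simp only [runLen]
    split
    · have := one_le_runLen b t; omega
    · omega

lemma pyRange_neg_one_snoc (a b : Int) (h : b < a) :
    PySem.List.pyRange a b (-1) = PySem.List.pyRange a (b + 1) (-1) ++ [b + 1] := by
  rw [PySem.List.pyRange_neg_one_eq_reverse, PySem.List.pyRange_neg_one_eq_reverse,
      PySem.List.pyRange_one_cons (by omega)]
  simp

lemma dpRef_length (arr : List Int) : (dpRef arr).length = arr.length := by
  induction arr with
  | nil => rfl
  | cons a t ih => simp [dpRef, ih]

-- ---------- B side ----------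
def stepB : List Int × Int → Int × Int → List Int × Int :=
  fun s p =>
    let runlen := s.2 + 1
    if !((p.1 > 0 && p.2 < 0) || (p.1 < 0 && p.2 > 0)) then
      (s.1 ++ PySem.List.pyRange runlen 0 (-1), 0)
    else
      (s.1, runlen)

lemma bInv : ∀ (t : List Int) (a : Int) (res : List Int) (k : Int), 0 ≤ k →
    (let s := ((a :: t).zip t).foldl stepB (res, k)
     s.1 ++ PySem.List.pyRange (s.2 + 1) 0 (-1))
    = res ++ PySem.List.pyRange (k + runLen a t) (runLen a t) (-1) ++ dpRef (a :: t) := by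
  intro t
  induction t with
  | nil =>
    intro a res k hk
    simp only [List.zip_nil_right, List.foldl_nil, runLen, dpRef]
    rw [pyRange_neg_one_snoc (k + 1) 0 (by omega)]
    simp
  | cons b t ih =>
    intro a res k hk
    have hz : (a :: b :: t).zip (b :: t) = (a, b) :: ((b :: t).zip t) := rfl
    rw [hz, List.foldl_cons]
    by_cases hc : ((a > 0 && b < 0) || (a < 0 && b > 0)) = true
    · have hs : stepB (res, k) (a, b) = (res, k + 1) := by
        simp [stepB, hc]
      rw [hs]
      have := ih b res (k + 1) (by omega)
      simp only at this
      rw [this]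
      have hL := one_le_runLen b t
      simp only [runLen, dpRef, hc, if_pos]
      rw [pyRange_neg_one_snoc (k + 1 + runLen b t) (runLen b t) (by omega)]
      have : k + 1 + runLen b t = k + (runLen b t + 1) := by ring
      rw [this]
      simp
    · have hs : stepB (res, k) (a, b) = (res ++ PySem.List.pyRange (k + 1) 0 (-1), 0) := by
        simp only [Bool.not_eq_true] at hc
        simp [stepB, hc]
      rw [hs]
      have := ih b (res ++ PySem.List.pyRange (k + 1) 0 (-1)) 0 (by omega)
      simp only at this
      rw [this]
      simp only [Bool.not_eq_true] at hc
      simp only [runLen, dpRef, hc]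
      rw [PySem.List.pyRange_neg_one_eq_nil (by omega : (0 : Int) + runLen b t ≤ runLen b t)]
      rw [pyRange_neg_one_snoc (k + 1) 0 (by omega)]
      simp


-- ---------- A side ----------
def stepA (arr : List Int) (dp : List Int) (i : Int) : List Int :=
  if (PySem.List.pyGetD arr i 0 > 0 && PySem.List.pyGetD arr (i + 1) 0 < 0) ||
     (PySem.List.pyGetD arr i 0 < 0 && PySem.List.pyGetD arr (i + 1) 0 > 0) then
    PySem.List.pySetD dp i (PySem.List.pyGetD dp (i + 1) 0 + 1)
  else
    PySem.List.pySetD dp i 1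

lemma dpRef_getD_last : ∀ (t : List Int) (a : Int), (dpRef (a :: t)).getD t.length 0 = 1 := by
  intro t
  induction t with
  | nil => intro a; simp [dpRef, runLen]
  | cons b t ih => intro a; simpa [dpRef] using ih b

lemma dpRef_getD_rec : ∀ (arr : List Int) (i : Nat), i + 1 < arr.length →
    (dpRef arr).getD i 0 =
      if (arr.getD i 0 > 0 && arr.getD (i + 1) 0 < 0) ||
         (arr.getD i 0 < 0 && arr.getD (i + 1) 0 > 0) then
        (dpRef arr).getD (i + 1) 0 + 1
      else 1 := by
  intro arr
  induction arr with
  | nil => intro i h; simp at h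
  | cons a t ih =>
    intro i h
    cases i with
    | zero =>
      cases t with
      | nil => simp at h
      | cons b t' => simp [dpRef, runLen]
    | succ j =>
      simp only [List.getD_cons_succ, dpRef]
      exact ih j (by simpa using h)

lemma stepA_eq (arr dp : List Int) (i : Nat) (h2 : i + 2 ≤ arr.length)
    (hdp : dp.getD (i + 1) 0 = (dpRef arr).getD (i + 1) 0) :
    stepA arr dp (i : Int) = dp.set i ((dpRef arr).getD i 0) := by
  have hcast : ((i : Int) + 1) = ((i + 1 : Nat) : Int) := by push_cast; ring
  unfold stepA
  rw [hcast]
  simp only [PySem.List.pyGetD_natCast, PySem.List.pySetD_natCast]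
  rw [hdp, dpRef_getD_rec arr i (by omega)]
  split <;> rfl

lemma aInv (arr : List Int) : ∀ (i : Nat) (dp : List Int),
    dp.length = arr.length → i + 2 ≤ arr.length →
    dp.getD (i + 1) 0 = (dpRef arr).getD (i + 1) 0 →
    (PySem.List.pyRange (i : Int) (-1) (-1)).foldl (stepA arr) dp
      = (dpRef arr).take (i + 1) ++ dp.drop (i + 1) := by
  intro i
  induction i with
  | zero =>
    intro dp hlen h2 hdp
    rw [show ((0 : Nat) : Int) = 0 from rfl,
        PySem.List.pyRange_neg_one_cons (by omega),
        show (0 : Int) - 1 = -1 by norm_num,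
        PySem.List.pyRange_neg_one_eq_nil (le_refl _)]
    simp only [List.foldl_cons, List.foldl_nil]
    rw [show (0 : Int) = ((0 : Nat) : Int) from rfl, stepA_eq arr dp 0 h2 hdp]
    rw [List.set_eq_take_cons_drop _ (by omega)]
    cases href : dpRef arr with
    | nil =>
      exfalso
      have := dpRef_length arr
      rw [href] at this
      simp at this
      omega
    | cons r rs => simp [List.getD]
  | succ j ih =>
    intro dp hlen h2 hdp
    have hcons : PySem.List.pyRange ((j + 1 : Nat) : Int) (-1) (-1)
        = ((j + 1 : Nat) : Int) :: PySem.List.pyRange (((j + 1 : Nat) : Int) - 1) (-1) (-1) :=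
      PySem.List.pyRange_neg_one_cons (by push_cast; omega)
    have hc2 : ((j + 1 : Nat) : Int) - 1 = ((j : Nat) : Int) := by push_cast; ring
    rw [hcons, hc2, List.foldl_cons, stepA_eq arr dp (j + 1) h2 hdp]
    set v := (dpRef arr).getD (j + 1) 0 with hv
    have hget : (dp.set (j + 1) v).getD (j + 1) 0 = v := by
      rw [List.getD_eq_getElem?_getD, List.getElem?_set_self (by omega)]
      rfl
    rw [ih (dp.set (j + 1) v) (by simp [hlen]) (by omega) (by rw [hget])]
    have hdrop : (dp.set (j + 1) v).drop (j + 1) = v :: dp.drop (j + 2) := by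
      rw [List.set_eq_take_cons_drop _ (by omega)]
      exact List.drop_left' (by simp; omega)
    have htake : (dpRef arr).take (j + 2) = (dpRef arr).take (j + 1) ++ [v] := by
      have hlt : j + 1 < (dpRef arr).length := by
        rw [dpRef_length]; omega
      rw [List.take_succ_eq_append_getElem hlt]
      rw [hv, List.getD_eq_getElem?_getD, List.getElem?_eq_getElem hlt]
      rfl
    rw [hdrop, htake]
    simp

lemma a_eq_dpRef (arr : List Int) (h : arr ≠ []) : altSubarrPrefix arr = dpRef arr := by
  match arr with
  | [a] =>
    simp [altSubarrPrefix, PySem.List.pySetD_of_nonneg, PySem.List.pyRange_neg_one_eq_nil,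
      dpRef, runLen]
  | a :: b :: t =>
    show (PySem.List.pyRange ((↑(a :: b :: t).length : Int) - 2) (-1) (-1)).foldl
        (stepA (a :: b :: t))
        (PySem.List.pySetD (List.replicate (a :: b :: t).length 0)
          ((↑(a :: b :: t).length : Int) - 1) 1)
        = dpRef (a :: b :: t)
    rw [show ((↑(a :: b :: t).length : Int) - 2) = ((t.length : Nat) : Int) by
          push_cast [List.length_cons]; omega,
        show ((↑(a :: b :: t).length : Int) - 1) = ((t.length + 1 : Nat) : Int) by
          push_cast [List.length_cons]; omega,
        PySem.List.pySetD_natCast]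
    have hreflen : (dpRef (a :: b :: t)).length = t.length + 2 := by
      rw [dpRef_length]; simp
    have hdp : ((List.replicate (a :: b :: t).length (0 : Int)).set (t.length + 1) 1).getD
        (t.length + 1) 0 = (dpRef (a :: b :: t)).getD (t.length + 1) 0 := by
      rw [List.getD_eq_getElem?_getD, List.getElem?_set_self (by simp)]
      have := dpRef_getD_last (b :: t) a
      simp only [List.length_cons] at this
      rw [this]
      rfl
    rw [aInv (a :: b :: t) t.length _ (by simp) (by simp) hdp]
    have hdrop : ((List.replicate (a :: b :: t).length (0 : Int)).set (t.length + 1) 1).drop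
        (t.length + 1) = [1] := by
      rw [List.set_eq_take_cons_drop _ (by simp)]
      rw [List.drop_left' (by simp)]
      congr 1
      rw [List.drop_of_length_le (by simp)]
    rw [hdrop]
    have hlt : t.length + 1 < (dpRef (a :: b :: t)).length := by omega
    have hlast : (dpRef (a :: b :: t))[t.length + 1] = 1 := by
      have := dpRef_getD_last (b :: t) a
      simp only [List.length_cons] at this
      rw [List.getD_eq_getElem?_getD, List.getElem?_eq_getElem hlt] at this
      simpa using this
    rw [show ([1] : List Int) = [(dpRef (a :: b :: t))[t.length + 1]] by rw [hlast]]
    rw [← List.take_succ_eq_append_getElem hlt]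
    exact List.take_of_length_le (by omega)

lemma alt_eq_dpRef (arr : List Int) : altSubarrPrefix_alt arr = dpRef arr := by
  cases arr with
  | nil => rfl
  | cons a t =>
    have hsl : PySem.List.slice (a :: t) (some 1) none = t := PySem.List.slice_from_one (a :: t)
    unfold altSubarrPrefix_alt
    rw [hsl]
    simp only [List.isEmpty_cons]
    have := bInv t a [] 0 (by omega)
    simp only at this
    rw [show (fun (s : List Int × Int) (p : Int × Int) =>
        let runlen := s.2 + 1
        if !((p.1 > 0 && p.2 < 0) || (p.1 < 0 && p.2 > 0)) then
          (s.1 ++ PySem.List.pyRange runlen 0 (-1), 0)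
        else (s.1, runlen)) = stepB from rfl]
    rw [this]
    rw [PySem.List.pyRange_neg_one_eq_nil (by simp : (0 : Int) + runLen a t ≤ runLen a t)]
    simp

theorem altSubarrPrefix_spec : Claim_equal_altSubarrPrefix := by
  intro arr _ hpre
  unfold Spec_altSubarrPrefix
  rw [alt_eq_dpRef, a_eq_dpRef arr hpre]
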